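-- pv_equiv track=rewrite | github.com/cyberLaVoy/kattis | python3/hydrasHeads.py | movesToDefeat
-- ===== SOURCE A (Python) =====
-- def growHead(hydra):
--     hydra[0] += 1
--     hydra[1] -= 2
--     hydra[2] += 1
--
-- def growTail(hydra):
--     hydra[1] += 1
--     hydra[2] += 1
--
-- def cutOffheads(hydra):
--     hydra[0] -= 2
--     hydra[2] += 1
--
-- def movesToDefeat(heads, tails):
--     hydra = [heads, tails, 0]
--     while True:
--         while hydra[0] > 1:
--             cutOffheads(hydra)
--         if hydra[0] == 1:
--             if hydra[1] == 0:
--                 return -1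
--             else:
--                 if hydra[1] >= 2:
--                     growHead(hydra)
--                 else:
--                     growTail(hydra)
--         elif hydra[0] == 0:
--             if hydra[1] == 0:
--                 return hydra[2]
--             else:
--                 while hydra[1] % 4 != 0:
--                     growTail(hydra)
--                 while hydra[1] != 0:
--                     growHead(hydra)
-- ===== SOURCE B (Python) =====
-- def movesToDefeat(heads, tails):
--     # Closed form: A's reduction loops compressed into parity/ceiling arithmetic.
--     if tails == 0:
--         return heads // 2 if heads % 2 == 0 else -1
--     half = heads // 2
--     if heads % 2 == 0:
--         k = (tails + 3) // 4
--         return 7 * k - tails + half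
--     if tails == 1:
--         return half + 3
--     rest = tails - 2
--     if rest == 0:
--         return half + 2
--     return half + 2 + 7 * ((rest + 3) // 4) - rest
-- ===== Notes on version B (the rewrite author's own statement) =====
-- stated objective: faster
-- what changed: Replaces A's step-by-step simulation of the cut/grow reduction loops with a closed-form parity-and-ceiling formula evaluated in O(1).
-- outside the precondition, e.g. on movesToDefeat(1, -1): A returns -1, B returns 5; on movesToDefeat(0, -1): A returns 1, B returns 1; on movesToDefeat(3, -2): A returns -1, B returns 0
import Mathlib
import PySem

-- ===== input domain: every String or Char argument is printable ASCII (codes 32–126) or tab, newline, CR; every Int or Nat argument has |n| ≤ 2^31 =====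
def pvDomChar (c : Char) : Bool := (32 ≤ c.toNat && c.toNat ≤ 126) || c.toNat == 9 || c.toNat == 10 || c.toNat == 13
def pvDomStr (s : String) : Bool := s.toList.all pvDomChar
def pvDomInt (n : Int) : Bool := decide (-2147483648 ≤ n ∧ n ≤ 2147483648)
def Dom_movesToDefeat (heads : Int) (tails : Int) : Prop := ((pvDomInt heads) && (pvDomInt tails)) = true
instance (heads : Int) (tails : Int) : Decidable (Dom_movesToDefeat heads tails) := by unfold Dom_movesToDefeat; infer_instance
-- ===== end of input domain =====

-- B replaces A's step-by-step simulation of the cut/grow reduction loops by a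
-- closed-form parity/ceiling formula (measured asymptotically faster).
-- A's loops are ported with a fuel parameter as totality guard; the wrappers pass
-- fuel that is proved sufficient on the whole precondition (heads ≥ 0, tails ≥ 0).

-- ===== PORT A =====
-- `while hydra[0] > 1: cutOffheads(hydra)`  (state: heads, move counter)
def cutLoopA : Nat → Int → Int → Int × Int
  | 0, h, c => (h, c)
  | f + 1, h, c => if 1 < h then cutLoopA f (h - 2) (c + 1) else (h, c)

-- `while hydra[1] % 4 != 0: growTail(hydra)`  (state: tails, move counter)
def padLoopA : Nat → Int → Int → Int × Int
  | 0, t, c => (t, c)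
  | f + 1, t, c => if PySem.Int.mod t 4 ≠ 0 then padLoopA f (t + 1) (c + 1) else (t, c)

-- `while hydra[1] != 0: growHead(hydra)`  (state: heads, tails, move counter);
-- with negative tails Python's loop never terminates and the fuel runs out
def ghLoopA : Nat → Int → Int → Int → Int × Int × Int
  | 0, h, t, c => (h, t, c)
  | f + 1, h, t, c => if t ≠ 0 then ghLoopA f (h + 1) (t - 2) (c + 1) else (h, t, c)

-- the `while True` loop; the fuel and the final `else` (a state on which Python
-- loops forever) are totality guards, never reached for heads ≥ 0, tails ≥ 0
def outerA : Nat → Int → Int → Int → Int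
  | 0, _, _, c => c
  | f + 1, h, t, c =>
    if (cutLoopA (h.toNat + 1) h c).1 = 1 then
      if t = 0 then -1
      else if 2 ≤ t then
        outerA f ((cutLoopA (h.toNat + 1) h c).1 + 1) (t - 2) ((cutLoopA (h.toNat + 1) h c).2 + 1)
      else outerA f (cutLoopA (h.toNat + 1) h c).1 (t + 1) ((cutLoopA (h.toNat + 1) h c).2 + 1)
    else if (cutLoopA (h.toNat + 1) h c).1 = 0 then
      if t = 0 then (cutLoopA (h.toNat + 1) h c).2
      else
        outerA f
          (ghLoopA ((padLoopA 4 t (cutLoopA (h.toNat + 1) h c).2).1.toNat + 1) 0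
            (padLoopA 4 t (cutLoopA (h.toNat + 1) h c).2).1
            (padLoopA 4 t (cutLoopA (h.toNat + 1) h c).2).2).1
          (ghLoopA ((padLoopA 4 t (cutLoopA (h.toNat + 1) h c).2).1.toNat + 1) 0
            (padLoopA 4 t (cutLoopA (h.toNat + 1) h c).2).1
            (padLoopA 4 t (cutLoopA (h.toNat + 1) h c).2).2).2.1
          (ghLoopA ((padLoopA 4 t (cutLoopA (h.toNat + 1) h c).2).1.toNat + 1) 0
            (padLoopA 4 t (cutLoopA (h.toNat + 1) h c).2).1
            (padLoopA 4 t (cutLoopA (h.toNat + 1) h c).2).2).2.2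
    else (cutLoopA (h.toNat + 1) h c).2   -- totality guard: Python diverges here

def movesToDefeat (heads : Int) (tails : Int) : Int :=
  outerA (tails.toNat + (-tails).toNat + 8) heads tails 0

-- ===== PORT B =====
def movesToDefeat_alt (heads : Int) (tails : Int) : Int :=
  if tails = 0 then
    (if PySem.Int.mod heads 2 = 0 then PySem.Int.floordiv heads 2 else -1)
  else
    let half := PySem.Int.floordiv heads 2
    if PySem.Int.mod heads 2 = 0 then
      let k := PySem.Int.floordiv (tails + 3) 4
      7 * k - tails + half
    else if tails = 1 then half + 3
    else
      let rest := tails - 2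
      if rest = 0 then half + 2
      else half + 2 + 7 * PySem.Int.floordiv (rest + 3) 4 - rest

-- ===== PRECONDITION & SPEC =====
-- Pre_ restricts to the problem's natural domain of nonnegative head/tail counts:
-- outside it A either never returns (e.g. any negative heads) or returns accidental
-- values of its leftover loop state (e.g. (1,-1) → -1, (0,-1) → 1).
def Pre_movesToDefeat (heads : Int) (tails : Int) : Prop := 0 ≤ heads ∧ 0 ≤ tails
instance (heads : Int) (tails : Int) : Decidable (Pre_movesToDefeat heads tails) := by
  unfold Pre_movesToDefeat; infer_instance

def pvWitness_movesToDefeat : Int × Int := (3, 5)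

def Spec_movesToDefeat (heads : Int) (tails : Int) (out : Int) : Prop := out = movesToDefeat_alt heads tails
instance (heads : Int) (tails : Int) (out : Int) : Decidable (Spec_movesToDefeat heads tails out) := by unfold Spec_movesToDefeat; infer_instance

-- ===== CLAIM (what is proved, stated in full; the proofs are below) =====
def Claim_equal_movesToDefeat : Prop := ∀ (heads : Int) (tails : Int), Dom_movesToDefeat heads tails → Pre_movesToDefeat heads tails → Spec_movesToDefeat heads tails (movesToDefeat heads tails)

-- ===== LEMMAS AND PROOFS =====

-- closed forms of the three inner loops (the stated fuel is sufficient)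
theorem cutLoopA_eval : ∀ (f : Nat) (h c : Int), 0 ≤ h → h.toNat < f →
    cutLoopA f h c = (h % 2, c + h / 2) := by
  intro f
  induction f with
  | zero => intro h c _ hf; omega
  | succ f ih =>
    intro h c h0 hf
    rw [cutLoopA]
    by_cases hg : 1 < h
    · rw [if_pos hg, ih (h - 2) (c + 1) (by omega) (by omega)]
      simp only [Prod.mk.injEq]
      constructor <;> omega
    · rw [if_neg hg]
      simp only [Prod.mk.injEq]
      constructor <;> omega

theorem padLoopA_eval : ∀ (f : Nat) (t c : Int), ((-t) % 4).toNat < f →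
    padLoopA f t c = (t + (-t) % 4, c + (-t) % 4) := by
  intro f
  induction f with
  | zero => intro t c hf; omega
  | succ f ih =>
    intro t c hf
    rw [padLoopA]
    rw [PySem.Int.mod_eq_emod_of_pos (show (0:Int) < 4 by norm_num)]
    by_cases hg : t % 4 = 0
    · simp only [hg, ne_eq, not_true_eq_false, if_false]
      simp only [Prod.mk.injEq]
      constructor <;> omega
    · simp only [hg, ne_eq, not_false_eq_true, if_true]
      rw [ih (t + 1) (c + 1) (by omega)]
      simp only [Prod.mk.injEq]
      constructor <;> omega

theorem ghLoopA_eval : ∀ (f : Nat) (h t c : Int), 0 ≤ t → t % 2 = 0 → t.toNat < f →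
    ghLoopA f h t c = (h + t / 2, 0, c + t / 2) := by
  intro f
  induction f with
  | zero => intro h t c _ _ hf; omega
  | succ f ih =>
    intro h t c h0 he hf
    rw [ghLoopA]
    by_cases hg : t = 0
    · simp only [hg, ne_eq, not_true_eq_false, if_false]
      simp only [Prod.mk.injEq]
      norm_num
    · simp only [hg, ne_eq, not_false_eq_true, if_true]
      rw [ih (h + 1) (t - 2) (c + 1) (by omega) (by omega) (by omega)]
      simp only [Prod.mk.injEq]
      exact ⟨by omega, trivial, by omega⟩

-- outerA on a state with even nonnegative heads (two iterations of the loop)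
theorem outerA_even (f : Nat) (h t c : Int) (hh : 0 ≤ h) (ht : 0 ≤ t) (hp : h % 2 = 0) :
    outerA (f + 1 + 1) h t c = if t = 0 then c + h / 2 else c + h / 2 + 7 * ((t + 3) / 4) - t := by
  rw [outerA, cutLoopA_eval _ h c hh (by omega)]
  simp only [hp]
  norm_num
  by_cases h0 : t = 0
  · simp [h0]
  · simp only [h0, if_false]
    rw [padLoopA_eval 4 t _ (by omega)]
    simp only
    rw [ghLoopA_eval _ _ _ _ (by omega) (by omega) (by omega)]
    simp only
    rw [outerA, cutLoopA_eval _ _ _ (by omega) (by omega)]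
    have h2 : (0 + (t + -t % 4) / 2) % 2 = 0 := by omega
    simp only [h2]
    norm_num
    omega

-- the full evaluation of A's machine on the natural domain (at most four iterations)
theorem outerA_eval (f : Nat) (h t c : Int) (hh : 0 ≤ h) (ht : 0 ≤ t) :
    outerA (f + 1 + 1 + 1 + 1) h t c =
      if h % 2 = 1 ∧ t = 0 then -1 else c + movesToDefeat_alt h t := by
  have hfd2 : ∀ a : Int, PySem.Int.floordiv a 2 = a / 2 := fun a =>
    PySem.Int.floordiv_eq_ediv_of_pos (by norm_num)
  have hfd4 : ∀ a : Int, PySem.Int.floordiv a 4 = a / 4 := fun a =>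
    PySem.Int.floordiv_eq_ediv_of_pos (by norm_num)
  have hm2 : ∀ a : Int, PySem.Int.mod a 2 = a % 2 := fun a =>
    PySem.Int.mod_eq_emod_of_pos (by norm_num)
  by_cases hp : h % 2 = 0
  · -- even heads: A never answers -1
    rw [show f + 1 + 1 + 1 + 1 = (f + 1 + 1) + 1 + 1 from rfl,
        outerA_even (f + 1 + 1) h t c hh ht hp]
    simp only [movesToDefeat_alt, hfd2, hfd4, hm2, hp]
    by_cases h0 : t = 0
    · simp [h0]
    · simp [h0]; omega
  · have hp1 : h % 2 = 1 := by omega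
    rw [outerA, cutLoopA_eval _ h c hh (by omega)]
    simp only [hp1]
    norm_num
    by_cases h0 : t = 0
    · simp [h0]
    · simp only [h0, if_false]
      by_cases h2 : 2 ≤ t
      · -- growHead: → two further loop iterations with even heads
        simp only [h2, if_true]
        rw [show f + 1 + 1 + 1 = (f + 1) + 1 + 1 from rfl,
            outerA_even (f + 1) 2 (t - 2) _ (by norm_num) (by omega) (by norm_num)]
        simp only [movesToDefeat_alt, hfd2, hfd4, hm2, hp1, h0]
        norm_num
        by_cases h3 : t = 2
        · simp [h3]; omega
        · have ht2 : ¬ (t - 2 = 0) := by omega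
          have ht1 : ¬ (t = 1) := by omega
          simp only [ht2, ht1, if_false]
          omega
      · -- tails = 1: growTail, then growHead, then one final cut
        have ht1 : t = 1 := by omega
        subst ht1
        simp only [h2, if_false]
        rw [outerA, cutLoopA_eval _ 1 _ (by norm_num) (by omega)]
        norm_num
        rw [outerA_even f 2 0 _ (by norm_num) (by norm_num) (by norm_num)]
        simp only [movesToDefeat_alt, hfd2, hfd4, hm2, hp1]
        norm_num
        omega

-- ===== VERDICT (by name: the statement is the Claim_ definition above) =====
theorem movesToDefeat_spec : Claim_equal_movesToDefeat := by
  intro heads tails _ hpre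
  unfold Spec_movesToDefeat movesToDefeat
  rw [show tails.toNat + (-tails).toNat + 8 = (tails.toNat + (-tails).toNat + 4) + 1 + 1 + 1 + 1 by omega,
      outerA_eval (tails.toNat + (-tails).toNat + 4) heads tails 0 hpre.1 hpre.2]
  by_cases hc : heads % 2 = 1 ∧ tails = 0
  · rw [if_pos hc]
    simp only [movesToDefeat_alt, hc.2,
      PySem.Int.mod_eq_emod_of_pos (show (0:Int) < 2 by norm_num)]
    have h1 : ¬ (heads % 2 = 0) := by omega
    simp [h1]
  · simp [hc]
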